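-- pv_equiv track=rewrite | github.com/gregoryann/Python-Beginner-Examples | +1500 Python Challenges/V Easy/Owofied a Sentence.py | owofied
-- ===== SOURCE A (Python) =====
-- def owofied(sentence):
-- 	a = {'i':'wi','e':'we'}
-- 	sentence2 = []
-- 	for n in [l for l in sentence]:
-- 		if n in a:
-- 			sentence2.append(a[n])
-- 		else:
-- 			sentence2.append(n)
-- 	return "".join(sentence2)+" owo"
-- ===== SOURCE B (Python) =====
-- def owofied(sentence):
-- 	return sentence.replace('i', 'wi').replace('e', 'we') + " owo"
-- ===== Notes on version B (the rewrite author's own statement) =====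
-- stated objective: idiomatic
-- what changed: Replaces the per-character dict-dispatch loop building a list that is joined with two chained str.replace passes plus concatenation; the order is safe because neither substitution produces a character the other rewrites.
import Mathlib
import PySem

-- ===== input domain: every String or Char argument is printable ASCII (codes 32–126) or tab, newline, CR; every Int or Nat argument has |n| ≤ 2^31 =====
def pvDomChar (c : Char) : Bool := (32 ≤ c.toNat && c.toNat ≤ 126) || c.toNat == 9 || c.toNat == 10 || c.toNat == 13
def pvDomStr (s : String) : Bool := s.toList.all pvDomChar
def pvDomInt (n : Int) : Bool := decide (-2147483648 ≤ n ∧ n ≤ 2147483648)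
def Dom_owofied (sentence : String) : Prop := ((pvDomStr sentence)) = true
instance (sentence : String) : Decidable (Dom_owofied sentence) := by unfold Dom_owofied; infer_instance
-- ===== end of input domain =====

-- B replaces A's per-character dict-dispatch loop with two chained str.replace passes ('i'→'wi', then 'e'→'we') plus " owo" (idiomatic).


-- ===== PORT A =====
-- A: dict a = {'i':'wi','e':'we'}; build sentence2 by appending a[n] or n for each char; join and add " owo"
def owofied (sentence : String) : String :=
  let a : PySem.Dict Char String := PySem.Dict.mk [('i', "wi"), ('e', "we")]
  let sentence2 : List String :=
    sentence.toList.foldl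
      (fun s2 n =>
        match a.get? n with
        | some v => s2 ++ [v]
        | none => s2 ++ [String.ofList [n]])
      []
  PySem.Str.join "" sentence2 ++ " owo"

-- ===== PORT B =====
def owofied_alt (sentence : String) : String :=
  PySem.Str.replace (PySem.Str.replace sentence "i" "wi") "e" "we" ++ " owo"

-- ===== PRECONDITION & SPEC =====
def Spec_owofied (sentence : String) (out : String) : Prop := out = owofied_alt sentence
instance (sentence : String) (out : String) : Decidable (Spec_owofied sentence out) := by unfold Spec_owofied; infer_instance

-- ===== CLAIM (what is proved, stated in full; the proofs are below) =====
def Claim_equal_owofied : Prop := ∀ (sentence : String), Dom_owofied sentence → Spec_owofied sentence (owofied sentence)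

-- ===== LEMMAS AND PROOFS =====

-- the per-character transform both programs realise
def owoChar (c : Char) : List Char :=
  if c = 'i' then ['w', 'i'] else if c = 'e' then ['w', 'e'] else [c]

-- single-character replace is a flatMap of a per-character substitution
lemma replace_go_single (o : Char) (new : List Char) :
    ∀ (l acc : List Char) (fuel : Nat), l.length ≤ fuel →
      PySem.Chars.replace.go [o] new fuel l acc =
        acc.reverse ++ l.flatMap (fun c => if c = o then new else [c]) := by
  intro l
  induction l with
  | nil =>
    intro acc fuel _
    cases fuel <;> simp [PySem.Chars.replace.go]
  | cons c t ih =>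
    intro acc fuel hf
    cases fuel with
    | zero => simp at hf
    | succ f =>
      have ht : t.length ≤ f := by simpa using hf
      by_cases hco : c = o
      · have hpre : [o].isPrefixOf (c :: t) = true := by
          simp [List.isPrefixOf, hco]
        simp [PySem.Chars.replace.go, hco, ih _ f ht]
      · have hpre : [o].isPrefixOf (c :: t) = false := by
          simp [List.isPrefixOf]
          exact fun h => (hco h.symm).elim
        simp [PySem.Chars.replace.go, hco, ih _ f ht]
        exact fun h => absurd h.symm hco

lemma replace_single (o : Char) (new s : List Char) :
    PySem.Chars.replace s [o] new = s.flatMap (fun c => if c = o then new else [c]) := by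
  have := replace_go_single o new s [] s.length (le_refl _)
  simpa [PySem.Chars.replace] using this

-- B's two replace passes compose to owoChar per character
lemma alt_toList (s : String) :
    (owofied_alt s).toList = s.toList.flatMap owoChar ++ " owo".toList := by
  show (PySem.Str.replace (PySem.Str.replace s "i" "wi") "e" "we" ++ " owo").toList = _
  have hi : ("i" : String).toList = ['i'] := rfl
  have he : ("e" : String).toList = ['e'] := rfl
  rw [String.toList_append, PySem.Str.toList_replace, PySem.Str.toList_replace, hi, he,
      replace_single, replace_single]
  have hwi : ("wi" : String).toList = ['w', 'i'] := rfl
  have hwe : ("we" : String).toList = ['w', 'e'] := rfl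
  rw [hwi, hwe]
  congr 1
  induction s.toList with
  | nil => simp
  | cons c t ih =>
    by_cases hci : c = 'i'
    · simp only [List.flatMap_cons, hci]
      simp [ih, owoChar]
    · by_cases hce : c = 'e' <;>
        simp [hci, hce, ih, owoChar]

-- empty-separator join is flatten
lemma join_nil_flatten (l : List (List Char)) :
    PySem.Chars.join [] l = l.flatten := by
  induction l with
  | nil => simp [PySem.Chars.join, List.intercalate]
  | cons x t ih =>
    cases t <;> simp_all [PySem.Chars.join, List.intercalate]

-- A's loop/join computes the same flatMap
lemma a_toList (s : String) :
    (owofied s).toList = s.toList.flatMap owoChar ++ " owo".toList := by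
  show (PySem.Str.join "" (s.toList.foldl _ []) ++ " owo").toList = _
  rw [String.toList_append]
  congr 1
  rw [PySem.Str.toList_join]
  have hsep : ("" : String).toList = ([] : List Char) := rfl
  rw [hsep, join_nil_flatten]
  have key : ∀ (l : List Char) (acc : List String),
      ((l.foldl
          (fun s2 n =>
            match (PySem.Dict.mk [('i', "wi"), ('e', "we")] : PySem.Dict Char String).get? n with
            | some v => s2 ++ [v]
            | none => s2 ++ [String.ofList [n]]) acc).map String.toList).flatten =
      (acc.map String.toList).flatten ++ l.flatMap owoChar := by
    intro l
    induction l with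
    | nil => intro acc; simp
    | cons c t ih =>
      intro acc
      simp only [List.foldl_cons]
      by_cases hi : c = 'i'
      · have h : (PySem.Dict.mk [('i', "wi"), ('e', "we")] : PySem.Dict Char String).get? c
            = some "wi" := by subst hi; rfl
        simp only [h, ih]
        subst hi; simp [owoChar]
      · by_cases he : c = 'e'
        · have h : (PySem.Dict.mk [('i', "wi"), ('e', "we")] : PySem.Dict Char String).get? c
              = some "we" := by subst he; rfl
          simp only [h, ih]
          subst he; simp [owoChar]
        · have b1 : ('i' == c) = false := beq_eq_false_iff_ne.mpr (fun h => hi h.symm)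
          have b2 : ('e' == c) = false := beq_eq_false_iff_ne.mpr (fun h => he h.symm)
          have h : (PySem.Dict.mk [('i', "wi"), ('e', "we")] : PySem.Dict Char String).get? c
              = none := by simp [PySem.Dict.get?, List.find?, b1, b2]
          simp only [h, ih]
          simp [owoChar, hi, he]
  exact key s.toList []

-- ===== VERDICT (by name: the statement is the Claim_ definition above) =====
theorem owofied_spec : Claim_equal_owofied := by
  intro s _
  show owofied s = owofied_alt s
  rw [← String.toList_inj, a_toList, alt_toList]
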